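-- pv_equiv track=rewrite | github.com/CloudSihmar/ansible-platform | modules/inventory/service.py | validate_inventory_content
-- ===== SOURCE A (Python) =====
-- def validate_inventory_content(content: str) -> bool:
--     """Basic inventory content validation"""
--     # Check if it's valid INI format (basic check)
--     lines = content.strip().split('\n')
--     group_found = False
--
--     for line in lines:
--         line = line.strip()
--         if line and not line.startswith('#'):
--             if line.startswith('[') and line.endswith(']'):
--                 group_found = True
--             elif '=' in line and group_found:
--                 return True
--
--     return False
-- ===== SOURCE B (Python) =====
-- def validate_inventory_content(content: str) -> bool:
--     """Basic inventory content validation (anchor-find + any over the tail)"""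
--     lines = [ln.strip() for ln in content.strip().split('\n')]
--
--     def is_header(ln):
--         return bool(ln) and not ln.startswith('#') and ln.startswith('[') and ln.endswith(']')
--
--     try:
--         i = next(k for k, ln in enumerate(lines) if is_header(ln))
--     except StopIteration:
--         return False
--     return any(ln and not ln.startswith('#') and not is_header(ln) and '=' in ln
--                for ln in lines[i + 1:])
-- ===== Notes on version B (the rewrite author's own statement) =====
-- stated objective: alternative
-- what changed: Replaced the flag-carrying early-return loop by an anchor search for the first group header (next/enumerate) followed by an any() scan of only the lines after it.
import Mathlib
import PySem

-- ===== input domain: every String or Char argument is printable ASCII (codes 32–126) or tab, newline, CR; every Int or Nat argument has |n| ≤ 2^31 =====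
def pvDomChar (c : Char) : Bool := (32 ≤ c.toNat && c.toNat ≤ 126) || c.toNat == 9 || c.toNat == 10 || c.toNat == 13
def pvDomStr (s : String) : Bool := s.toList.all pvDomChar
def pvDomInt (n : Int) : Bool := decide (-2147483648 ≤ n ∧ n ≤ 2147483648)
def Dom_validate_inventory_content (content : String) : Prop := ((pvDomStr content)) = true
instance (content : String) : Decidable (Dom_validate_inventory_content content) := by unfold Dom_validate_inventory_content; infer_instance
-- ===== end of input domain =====

-- B replaces A's flag-carrying early-return loop by an anchor search for the first
-- group header followed by an any() scan of the lines after it (alternative decomposition).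

-- ===== PORT A =====
-- the for-loop with the mutable group_found flag and the early `return True`
def pvLoopA : List String → Bool → Bool
  | [], _ => false
  | l :: rest, gf =>
    let line := PySem.Str.strip l
    if line ≠ "" && !(PySem.Str.startswith line "#") then
      if PySem.Str.startswith line "[" && PySem.Str.endswith line "]" then
        pvLoopA rest true
      else if PySem.Str.isIn "=" line && gf then
        true
      else
        pvLoopA rest gf
    else
      pvLoopA rest gf

def validate_inventory_content (content : String) : Bool :=
  -- split('\n') has a non-empty literal separator, so split? always returns some
  let lines := (PySem.Str.split? (PySem.Str.strip content) "\n").getD []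
  pvLoopA lines false

-- ===== PORT B =====
-- is_header on an already-stripped line
def pvIsHeader (ln : String) : Bool :=
  ln ≠ "" && !(PySem.Str.startswith ln "#") &&
  PySem.Str.startswith ln "[" && PySem.Str.endswith ln "]"

-- the per-line key=value test of B's any(): non-empty, not a comment, not a header, contains '='
def pvKV (ln : String) : Bool :=
  ln ≠ "" && !(PySem.Str.startswith ln "#") && !(pvIsHeader ln) && PySem.Str.isIn "=" ln

def validate_inventory_content_alt (content : String) : Bool :=
  let lines := ((PySem.Str.split? (PySem.Str.strip content) "\n").getD []).map PySem.Str.strip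
  match lines.findIdx? pvIsHeader with
  | none => false
  | some i => (lines.drop (i + 1)).any pvKV

-- ===== PRECONDITION & SPEC =====
def Spec_validate_inventory_content (content : String) (out : Bool) : Prop := out = validate_inventory_content_alt content
instance (content : String) (out : Bool) : Decidable (Spec_validate_inventory_content content out) := by unfold Spec_validate_inventory_content; infer_instance

-- ===== CLAIM (what is proved, stated in full; the proofs are below) =====
def Claim_equal_validate_inventory_content : Prop := ∀ (content : String), Dom_validate_inventory_content content → Spec_validate_inventory_content content (validate_inventory_content content)

-- ===== LEMMAS AND PROOFS =====

-- with the flag set, A's loop is just an `any pvKV` over the stripped lines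
lemma pvLoopA_true (ls : List String) :
    pvLoopA ls true = ls.any (fun l => pvKV (PySem.Str.strip l)) := by
  induction ls with
  | nil => rfl
  | cons l rest ih =>
    simp only [pvLoopA, List.any_cons, pvKV, pvIsHeader]
    by_cases hE : PySem.Str.strip l = "" <;>
      cases hH : PySem.Str.startswith (PySem.Str.strip l) "#" <;>
      cases hL : PySem.Str.startswith (PySem.Str.strip l) "[" <;>
      cases hR : PySem.Str.endswith (PySem.Str.strip l) "]" <;>
      cases hQ : PySem.Str.isIn "=" (PySem.Str.strip l) <;>
      simp_all [pvKV, pvIsHeader]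

-- with the flag clear, A's loop equals B's anchor-then-any form
lemma pvLoopA_false (ls : List String) :
    pvLoopA ls false =
      (match (ls.map PySem.Str.strip).findIdx? pvIsHeader with
       | none => false
       | some i => ((ls.map PySem.Str.strip).drop (i + 1)).any pvKV) := by
  induction ls with
  | nil => rfl
  | cons l rest ih =>
    simp only [pvLoopA, List.map_cons, List.findIdx?_cons]
    by_cases hE : PySem.Str.strip l = "" <;>
      cases hH : PySem.Str.startswith (PySem.Str.strip l) "#" <;>
      cases hL : PySem.Str.startswith (PySem.Str.strip l) "[" <;>
      cases hR : PySem.Str.endswith (PySem.Str.strip l) "]" <;>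
      cases hQ : PySem.Str.isIn "=" (PySem.Str.strip l) <;>
      · cases hfi : List.findIdx? pvIsHeader (List.map PySem.Str.strip rest) <;>
          simp_all [pvKV, pvIsHeader, pvLoopA_true, List.any_map, Function.comp_def]

-- ===== VERDICT (by name: the statement is the Claim_ definition above) =====
theorem validate_inventory_content_spec : Claim_equal_validate_inventory_content := by
  intro content _
  unfold Spec_validate_inventory_content validate_inventory_content validate_inventory_content_alt
  simp only [pvLoopA_false]
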